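-- pv_equiv track=rewrite | github.com/Qchan233/codelet | idom.py | rpo_dfs
-- ===== SOURCE A (Python) =====
-- def rpo_dfs(graph, start):
--     visited = set()
--     postorder = []
--
--     def dfs(u):
--         visited.add(u)
--         for v in graph.get(u, []):
--             if v not in visited:
--                 dfs(v)
--         postorder.append(u)
--
--     dfs(start)
--     return list(reversed(postorder))
-- ===== SOURCE B (Python) =====
-- def rpo_dfs(graph, start):
--     visited = {start}
--     postorder = []
--     stack = [(start, iter(graph.get(start, [])))]
--     while stack:
--         u, it = stack[-1]
--         for v in it:
--             if v not in visited:
--                 visited.add(v)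
--                 stack.append((v, iter(graph.get(v, []))))
--                 break
--         else:
--             postorder.append(u)
--             stack.pop()
--     return postorder[::-1]
-- ===== Notes on version B (the rewrite author's own statement) =====
-- stated objective: alternative
-- what changed: Replaces the recursive nested dfs helper by an iterative DFS over an explicit stack of (node, neighbor-iterator) frames, so no Python recursion is used while visited-marking timing and child order are preserved.
import Mathlib
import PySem

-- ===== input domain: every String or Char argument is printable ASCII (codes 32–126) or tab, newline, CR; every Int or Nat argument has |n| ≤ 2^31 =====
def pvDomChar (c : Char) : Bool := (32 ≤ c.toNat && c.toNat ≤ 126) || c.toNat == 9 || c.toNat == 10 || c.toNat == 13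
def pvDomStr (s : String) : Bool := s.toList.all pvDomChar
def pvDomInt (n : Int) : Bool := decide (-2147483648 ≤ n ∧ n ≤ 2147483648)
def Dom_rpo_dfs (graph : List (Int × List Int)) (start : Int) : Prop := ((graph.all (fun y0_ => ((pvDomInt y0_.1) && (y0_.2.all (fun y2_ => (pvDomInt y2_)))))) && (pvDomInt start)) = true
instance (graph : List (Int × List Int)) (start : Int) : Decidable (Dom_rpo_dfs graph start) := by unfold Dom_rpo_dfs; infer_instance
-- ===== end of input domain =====

-- B replaces A's recursive nested dfs helper by an iterative DFS over an explicit stack of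
-- (node, remaining-neighbors) frames; same return value (objective: alternative).

-- graph.get(u, []) (shared by both ports; first-match dict lookup)
def pvAdj (graph : List (Int × List Int)) (u : Int) : List Int :=
  PySem.Dict.getD (PySem.Dict.mk graph) u []

-- all node values occurring in the input (used only as a fuel bound)
def pvNodes (graph : List (Int × List Int)) (start : Int) : List Int :=
  start :: graph.flatMap (fun p => p.1 :: p.2)

-- ===== PORT A =====
-- A's 'for v in graph.get(u, [])' loop with the recursive dfs call inlined; state = (visited, postorder).
-- The fuel argument only guards totality; it is proved below never to run out at the fuel rpo_dfs passes.
def pvDfsList (graph : List (Int × List Int)) :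
    Nat → List Int → PySem.Set Int × List Int → Option (PySem.Set Int × List Int)
  | _, [], st => some st
  | f, v :: vs, (vis, post) =>
    if PySem.Set.contains vis v then pvDfsList graph f vs (vis, post)
    else
      match f with
      | 0 => none
      | g + 1 =>
        match pvDfsList graph g (pvAdj graph v) (PySem.Set.add vis v, post) with
        | none => none
        | some (vis1, post1) => pvDfsList graph (g + 1) vs (vis1, post1 ++ [v])
  termination_by f vs _ => (f, vs.length)

def rpo_dfs (graph : List (Int × List Int)) (start : Int) : List Int :=
  match pvDfsList graph (pvNodes graph start).length (pvAdj graph start)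
      (PySem.Set.add PySem.Set.empty start, []) with
  | some (_, post) => (post ++ [start]).reverse
  | none => []

-- ===== PORT B =====
-- Source B's while loop: peek the top frame, advance its remaining-neighbor list, push a fresh frame on the
-- first unvisited neighbor, pop (appending to postorder) when exhausted.
-- The fuel argument only guards totality; it is proved below never to run out at the fuel rpo_dfs_alt passes.
def pvRunB (graph : List (Int × List Int)) :
    Nat → PySem.Set Int × List Int × List (Int × List Int) → Option (List Int)
  | 0, _ => none
  | _ + 1, (_, post, []) => some post
  | f + 1, (vis, post, (u, []) :: frames) => pvRunB graph f (vis, post ++ [u], frames)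
  | f + 1, (vis, post, (u, v :: rest) :: frames) =>
    if PySem.Set.contains vis v then pvRunB graph f (vis, post, (u, rest) :: frames)
    else pvRunB graph f (PySem.Set.add vis v, post, (v, pvAdj graph v) :: (u, rest) :: frames)

def rpo_dfs_alt (graph : List (Int × List Int)) (start : Int) : List Int :=
  let n := (pvNodes graph start).length
  let e := (graph.flatMap (fun p => p.2)).length
  ((pvRunB graph ((e + 2) * n + e + 2)
      (PySem.Set.add PySem.Set.empty start, [], [(start, pvAdj graph start)])).getD []).reverse

-- ===== PRECONDITION & SPEC =====
def Spec_rpo_dfs (graph : List (Int × List Int)) (start : Int) (out : List Int) : Prop := out = rpo_dfs_alt graph start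
instance (graph : List (Int × List Int)) (start : Int) (out : List Int) : Decidable (Spec_rpo_dfs graph start out) := by unfold Spec_rpo_dfs; infer_instance

-- ===== CLAIM (what is proved, stated in full; the proofs are below) =====
def Claim_equal_rpo_dfs : Prop := ∀ (graph : List (Int × List Int)) (start : Int), Dom_rpo_dfs graph start → Spec_rpo_dfs graph start (rpo_dfs graph start)

-- ===== LEMMAS AND PROOFS =====

theorem pvAdj_cases (graph : List (Int × List Int)) (u : Int) :
    pvAdj graph u = [] ∨ ∃ p ∈ graph, pvAdj graph u = p.2 := by
  induction graph with
  | nil => left; rfl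
  | cons q rest ih =>
    obtain ⟨k, ws⟩ := q
    by_cases h : k = u
    · right
      refine ⟨(k, ws), List.mem_cons_self, ?_⟩
      simp [pvAdj, PySem.Dict.getD_eq_get?_getD, PySem.Dict.get?_mk_cons, h]
    · have : pvAdj ((k, ws) :: rest) u = pvAdj rest u := by
        simp [pvAdj, PySem.Dict.getD_eq_get?_getD, PySem.Dict.get?_mk_cons, h]
      rw [this]
      rcases ih with h' | ⟨p, hp, h'⟩
      · left; exact h'
      · right; exact ⟨p, List.mem_cons_of_mem _ hp, h'⟩

theorem pvAdj_sub (graph : List (Int × List Int)) (u v : Int) (h : v ∈ pvAdj graph u) :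
    v ∈ graph.flatMap (fun p => p.2) := by
  rcases pvAdj_cases graph u with h' | ⟨p, hp, h'⟩
  · rw [h'] at h; cases h
  · rw [h'] at h; exact List.mem_flatMap.2 ⟨p, hp, h⟩

theorem pvAdj_nodes (graph : List (Int × List Int)) (start u v : Int) (h : v ∈ pvAdj graph u) :
    v ∈ pvNodes graph start := by
  have := pvAdj_sub graph u v h
  rcases List.mem_flatMap.1 this with ⟨p, hp, hv⟩
  exact List.mem_cons_of_mem _ (List.mem_flatMap.2 ⟨p, hp, List.mem_cons_of_mem _ hv⟩)

theorem pvAdj_len (graph : List (Int × List Int)) (u : Int) :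
    (pvAdj graph u).length ≤ (graph.flatMap (fun p => p.2)).length := by
  rcases pvAdj_cases graph u with h' | ⟨p, hp, h'⟩
  · simp [h']
  · rw [h', List.length_flatMap]
    exact List.single_le_sum (fun _ _ => Nat.zero_le _) _
      (List.mem_map.2 ⟨p, hp, rfl⟩)

-- number of input nodes not yet visited (the recursion/loop measure)
def pvMcard (graph : List (Int × List Int)) (start : Int) (vis : List Int) : Nat :=
  ((pvNodes graph start).toFinset.filter (fun x => x ∉ vis)).card

theorem pvMcard_le (graph : List (Int × List Int)) (start : Int) (vis : List Int) :
    pvMcard graph start vis ≤ (pvNodes graph start).length :=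
  (Finset.card_filter_le _ _).trans (List.toFinset_card_le _)

theorem pvMcard_add (graph : List (Int × List Int)) (start v : Int) (vis : List Int)
    (hv : v ∈ pvNodes graph start) (hnv : v ∉ vis) :
    pvMcard graph start (PySem.Set.add vis v) + 1 = pvMcard graph start vis := by
  unfold pvMcard
  rw [PySem.Set.add_of_not_mem hnv]
  have h1 : ((pvNodes graph start).toFinset.filter (fun x => x ∉ vis ++ [v]))
      = ((pvNodes graph start).toFinset.filter (fun x => x ∉ vis)).erase v := by
    ext x
    simp [Finset.mem_erase, List.mem_append, and_comm, and_assoc, not_or]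
  have hv' : v ∈ ((pvNodes graph start).toFinset.filter (fun x => x ∉ vis)) := by
    simp [List.mem_toFinset, hv, hnv]
  rw [h1, Finset.card_erase_add_one hv']

theorem pvMcard_mono (graph : List (Int × List Int)) (start : Int) (vis vis' : List Int)
    (h : ∀ x ∈ vis, x ∈ vis') : pvMcard graph start vis' ≤ pvMcard graph start vis := by
  apply Finset.card_le_card
  intro x hx
  simp only [Finset.mem_filter] at hx ⊢
  exact ⟨hx.1, fun hm => hx.2 (h x hm)⟩

-- A's dfs succeeds whenever the fuel exceeds the number of unvisited input nodes
theorem pvAsuff (graph : List (Int × List Int)) (start : Int) :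
    ∀ k f vs (vis post : List Int),
      (∀ v ∈ vs, v ∈ pvNodes graph start) → (∀ x ∈ vis, x ∈ pvNodes graph start) →
      pvMcard graph start vis ≤ k → k < f →
      ∃ vis' post', pvDfsList graph f vs (vis, post) = some (vis', post') ∧
        (∀ x ∈ vis, x ∈ vis') ∧ (∀ x ∈ vis', x ∈ pvNodes graph start) := by
  intro k
  induction k using Nat.strong_induction_on with
  | _ k ihk =>
  intro f vs
  induction vs with
  | nil =>
    intro vis post _ hvis _ _
    exact ⟨vis, post, by simp [pvDfsList], fun x hx => hx, hvis⟩
  | cons v vs ih =>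
    intro vis post hvs hvis hk hf
    by_cases hv : v ∈ vis
    · have hstep : pvDfsList graph f (v :: vs) (vis, post) = pvDfsList graph f vs (vis, post) := by
        rw [pvDfsList.eq_def]
        simp [PySem.Set.contains_iff, hv]
      rw [hstep]
      exact ih vis post (fun w hw => hvs w (List.mem_cons_of_mem _ hw)) hvis hk hf
    · have hvN : v ∈ pvNodes graph start := hvs v List.mem_cons_self
      have hnv : v ∉ vis := hv
      have hm1 : pvMcard graph start (PySem.Set.add vis v) + 1 = pvMcard graph start vis :=
        pvMcard_add graph start v vis hvN hnv
      have hk1 : 1 ≤ k := by omega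
      obtain ⟨g, rfl⟩ : ∃ g, f = g + 1 := ⟨f - 1, by omega⟩
      have hvisadd : ∀ x ∈ PySem.Set.add vis v, x ∈ pvNodes graph start := by
        intro x hx
        rcases (PySem.Set.mem_add vis v x).1 hx with hx | rfl
        · exact hvis x hx
        · exact hvN
      obtain ⟨vis1, post1, heq1, hgrow1, hsub1⟩ :=
        ihk (k - 1) (by omega) g (pvAdj graph v) (PySem.Set.add vis v) post
          (fun w hw => pvAdj_nodes graph start v w hw) hvisadd (by omega) (by omega)
      obtain ⟨vis', post', heq2, hgrow2, hsub2⟩ :=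
        ihk (k - 1) (by omega) (g + 1) vs vis1 (post1 ++ [v])
          (fun w hw => hvs w (List.mem_cons_of_mem _ hw)) hsub1
          (by
            have := pvMcard_mono graph start (PySem.Set.add vis v) vis1 hgrow1
            omega)
          (by omega)
      refine ⟨vis', post', ?_, ?_, hsub2⟩
      · rw [pvDfsList.eq_def]
        rw [PySem.Set.add_of_not_mem hnv] at heq1
        simp [hv, heq1, heq2]
      · intro x hx
        exact hgrow2 x (hgrow1 x ((PySem.Set.mem_add vis v x).2 (Or.inl hx)))

-- big-step semantics of B's machine
def pvRunsTo (graph : List (Int × List Int))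
    (st : PySem.Set Int × List Int × List (Int × List Int)) (r : List Int) : Prop :=
  ∃ f, pvRunB graph f st = some r

theorem pvRunB_mono (graph : List (Int × List Int)) :
    ∀ f f' st r, f ≤ f' → pvRunB graph f st = some r → pvRunB graph f' st = some r := by
  intro f
  induction f with
  | zero => intro f' st r _ h; simp [pvRunB] at h
  | succ f ih =>
    intro f' st r hle h
    obtain ⟨f2, rfl⟩ : ∃ g, f' = g + 1 := ⟨f' - 1, by omega⟩
    obtain ⟨vis, post, stack⟩ := st
    match stack with
    | [] => simpa [pvRunB] using h
    | (u, []) :: frames =>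
      simp only [pvRunB] at h ⊢
      exact ih f2 _ r (by omega) h
    | (u, v :: rest) :: frames =>
      simp only [pvRunB] at h ⊢
      by_cases hv : v ∈ vis
      · rw [if_pos ((PySem.Set.contains_iff vis v).2 hv)] at h ⊢
        exact ih f2 _ r (by omega) h
      · have hc : ¬ (PySem.Set.contains vis v = true) :=
          fun hct => hv ((PySem.Set.contains_iff vis v).1 hct)
        rw [if_neg hc] at h ⊢
        exact ih f2 _ r (by omega) h

-- simulation: a finished A-loop corresponds to B's machine consuming the matching frame
theorem pvSim (graph : List (Int × List Int)) :
    ∀ f vs (vis post : List Int) u frames vis' post' r,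
      pvDfsList graph f vs (vis, post) = some (vis', post') →
      pvRunsTo graph (vis', post' ++ [u], frames) r →
      pvRunsTo graph (vis, post, (u, vs) :: frames) r := by
  intro f
  induction f using Nat.strong_induction_on with
  | _ f ihf =>
  intro vs
  induction vs with
  | nil =>
    intro vis post u frames vis' post' r hd hrun
    rw [pvDfsList.eq_def] at hd
    simp at hd
    obtain ⟨rfl, rfl⟩ := hd
    obtain ⟨fB, hB⟩ := hrun
    exact ⟨fB + 1, by simp only [pvRunB]; exact hB⟩
  | cons v vs ih =>
    intro vis post u frames vis' post' r hd hrun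
    by_cases hv : v ∈ vis
    · rw [pvDfsList.eq_def] at hd
      simp [hv] at hd
      obtain ⟨fB, hB⟩ := ih vis post u frames vis' post' r hd hrun
      refine ⟨fB + 1, ?_⟩
      simp only [pvRunB]
      rw [if_pos ((PySem.Set.contains_iff vis v).2 hv)]
      exact hB
    · obtain ⟨g, rfl⟩ : ∃ g, f = g + 1 := by
        rcases f with _ | g
        · rw [pvDfsList.eq_def] at hd; simp [hv] at hd
        · exact ⟨g, rfl⟩
      have hc : ¬ (PySem.Set.contains vis v = true) :=
        fun hct => hv ((PySem.Set.contains_iff vis v).1 hct)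
      rcases hm : pvDfsList graph g (pvAdj graph v) (PySem.Set.add vis v, post) with _ | ⟨vis1, post1⟩
      · rw [pvDfsList.eq_def] at hd
        have hm' := hm
        rw [PySem.Set.add_of_not_mem hv] at hm'
        simp [hv, hm'] at hd
      · rw [pvDfsList.eq_def] at hd
        have hm' := hm
        rw [PySem.Set.add_of_not_mem hv] at hm'
        simp [hv, hm'] at hd
        have step1 := ih vis1 (post1 ++ [v]) u frames vis' post' r hd hrun
        obtain ⟨fB, hB⟩ :=
          ihf g (by omega) (pvAdj graph v) (PySem.Set.add vis v) post v
            ((u, vs) :: frames) vis1 post1 r hm step1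
        refine ⟨fB + 1, ?_⟩
        simp only [pvRunB]
        rw [if_neg hc]
        exact hB

-- B's machine halts given enough fuel
theorem pvBsuff (graph : List (Int × List Int)) (start : Int) :
    ∀ f (vis post : List Int) stack,
      (∀ fr ∈ stack, ∀ v ∈ fr.2, v ∈ pvNodes graph start) →
      (∀ x ∈ vis, x ∈ pvNodes graph start) →
      ((graph.flatMap (fun p => p.2)).length + 2) * pvMcard graph start vis +
        (stack.map (fun fr => fr.2.length)).sum + stack.length < f →
      ∃ r, pvRunB graph f (vis, post, stack) = some r := by
  intro f
  induction f with
  | zero => intro vis post stack _ _ h; omega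
  | succ f ih =>
    intro vis post stack hstk hvis hlt
    match stack with
    | [] => exact ⟨post, by simp [pvRunB]⟩
    | (u, []) :: frames =>
      simp only [pvRunB]
      apply ih _ _ frames (fun fr hf => hstk fr (List.mem_cons_of_mem _ hf)) hvis
      simp only [List.map_cons, List.sum_cons, List.length_cons, List.length_nil] at hlt ⊢
      omega
    | (u, v :: rest) :: frames =>
      simp only [pvRunB]
      by_cases hv : v ∈ vis
      · rw [if_pos ((PySem.Set.contains_iff vis v).2 hv)]
        apply ih _ _ ((u, rest) :: frames) ?_ hvis ?_
        · intro fr hf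
          rcases List.mem_cons.1 hf with rfl | hf
          · intro w hw
            exact hstk (u, v :: rest) List.mem_cons_self w (List.mem_cons_of_mem _ hw)
          · exact hstk fr (List.mem_cons_of_mem _ hf)
        · simp only [List.map_cons, List.sum_cons, List.length_cons] at hlt ⊢
          omega
      · have hc : ¬ (PySem.Set.contains vis v = true) :=
          fun hct => hv ((PySem.Set.contains_iff vis v).1 hct)
        rw [if_neg hc]
        have hvN : v ∈ pvNodes graph start :=
          hstk (u, v :: rest) List.mem_cons_self v List.mem_cons_self
        have hm1 := pvMcard_add graph start v vis hvN hv
        have hlen := pvAdj_len graph v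
        apply ih _ _ ((v, pvAdj graph v) :: (u, rest) :: frames) ?_ ?_ ?_
        · intro fr hf
          rcases List.mem_cons.1 hf with rfl | hf
          · exact fun w hw => pvAdj_nodes graph start v w hw
          rcases List.mem_cons.1 hf with rfl | hf
          · intro w hw
            exact hstk (u, v :: rest) List.mem_cons_self w (List.mem_cons_of_mem _ hw)
          · exact hstk fr (List.mem_cons_of_mem _ hf)
        · intro x hx
          rcases (PySem.Set.mem_add vis v x).1 hx with hx | rfl
          · exact hvis x hx
          · exact hvN
        · have h2 : ((graph.flatMap (fun p => p.2)).length + 2) * pvMcard graph start vis =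
              ((graph.flatMap (fun p => p.2)).length + 2) *
                pvMcard graph start (PySem.Set.add vis v) +
                (graph.flatMap (fun p => p.2)).length + 2 := by
            rw [← hm1]; ring
          simp only [List.map_cons, List.sum_cons, List.length_cons] at hlt ⊢
          omega

theorem rpo_dfs_eq (graph : List (Int × List Int)) (start : Int) :
    rpo_dfs graph start = rpo_dfs_alt graph start := by
  have hstartN : start ∈ pvNodes graph start := List.mem_cons_self
  have hvis0 : ∀ x ∈ PySem.Set.add PySem.Set.empty start, x ∈ pvNodes graph start := by
    intro x hx
    rcases (PySem.Set.mem_add PySem.Set.empty start x).1 hx with hx | rfl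
    · cases hx
    · exact hstartN
  have hn1 : 1 ≤ (pvNodes graph start).length := by simp [pvNodes]
  have hm0 : pvMcard graph start (PySem.Set.add PySem.Set.empty start) + 1 =
      pvMcard graph start PySem.Set.empty :=
    pvMcard_add graph start start PySem.Set.empty hstartN (by simp [PySem.Set.empty])
  have hle0 : pvMcard graph start PySem.Set.empty ≤ (pvNodes graph start).length :=
    pvMcard_le graph start _
  obtain ⟨vis1, post1, heq, hgrow, hsub⟩ :=
    pvAsuff graph start ((pvNodes graph start).length - 1) (pvNodes graph start).length
      (pvAdj graph start) (PySem.Set.add PySem.Set.empty start) []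
      (fun w hw => pvAdj_nodes graph start start w hw) hvis0 (by omega) (by omega)
  have hA : rpo_dfs graph start = (post1 ++ [start]).reverse := by
    unfold rpo_dfs
    rw [heq]
  have hfin : pvRunsTo graph (vis1, post1 ++ [start], []) (post1 ++ [start]) :=
    ⟨1, by simp [pvRunB]⟩
  obtain ⟨f0, h0B⟩ :=
    pvSim graph (pvNodes graph start).length (pvAdj graph start)
      (PySem.Set.add PySem.Set.empty start) [] start [] vis1 post1 (post1 ++ [start]) heq hfin
  have hmle : pvMcard graph start (PySem.Set.add PySem.Set.empty start) ≤
      (pvNodes graph start).length := by omega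
  obtain ⟨r, hr⟩ :=
    pvBsuff graph start
      (((graph.flatMap (fun p => p.2)).length + 2) * (pvNodes graph start).length +
        (graph.flatMap (fun p => p.2)).length + 2)
      (PySem.Set.add PySem.Set.empty start) [] [(start, pvAdj graph start)]
      (by
        intro fr hf
        rcases List.mem_cons.1 hf with rfl | hf
        · exact fun w hw => pvAdj_nodes graph start start w hw
        · cases hf)
      hvis0
      (by
        have hlen := pvAdj_len graph start
        have hmul := Nat.mul_le_mul_left ((graph.flatMap (fun p => p.2)).length + 2) hmle
        simp only [List.map_cons, List.sum_cons, List.length_cons, List.map_nil,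
          List.sum_nil, List.length_nil]
        omega)
  have hrB : r = post1 ++ [start] := by
    have h1 := pvRunB_mono graph f0 (max f0 (((graph.flatMap (fun p => p.2)).length + 2) *
      (pvNodes graph start).length + (graph.flatMap (fun p => p.2)).length + 2)) _ _
      (Nat.le_max_left _ _) h0B
    have h2 := pvRunB_mono graph _ (max f0 (((graph.flatMap (fun p => p.2)).length + 2) *
      (pvNodes graph start).length + (graph.flatMap (fun p => p.2)).length + 2)) _ _
      (Nat.le_max_right _ _) hr
    rw [h1] at h2
    exact (Option.some_inj.mp h2).symm
  have hB : rpo_dfs_alt graph start = (post1 ++ [start]).reverse := by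
    unfold rpo_dfs_alt
    simp only []
    rw [hr, hrB]
    rfl
  rw [hA, hB]

-- ===== VERDICT (by name: the statement is the Claim_ definition above) =====
theorem rpo_dfs_spec : Claim_equal_rpo_dfs := by
  intro graph start _
  exact rpo_dfs_eq graph start
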